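-- pv_equiv track=rewrite | github.com/sirajudinBadi/CodingNinjas-Data-Science-ML-Solutions | Tuples, Dictionary and Sets/Even count.py | evenCount
-- ===== SOURCE A (Python) =====
-- def evenCount(arr):
--     frequency = {}  # Dictionary to store the frequency of every number in array.
--
--     for i in arr:
--         frequency[i] = frequency.get(i, 0) + 1
--
--     # To find the first number with an even frequency
--     for i in arr:
--         if frequency[i] % 2 == 0:
--             return i
--
--     # To satisfy the edge case
--     return -1
-- ===== SOURCE B (Python) =====
-- def evenCount(arr):
--     # Recursive elimination: check the head's total count; if even it is the answer,
--     # otherwise delete every occurrence of the head and recurse. No dictionary at all.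
--     if not arr:
--         return -1
--     x = arr[0]
--     if arr.count(x) % 2 == 0:
--         return x
--     return evenCount([y for y in arr if y != x])
-- ===== Notes on version B (the rewrite author's own statement) =====
-- stated objective: alternative
-- what changed: Replaces the count-dictionary-then-scan with recursive elimination: test whether the head's total count is even, otherwise filter out all its occurrences and recurse; no frequency map is built.
import Mathlib
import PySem

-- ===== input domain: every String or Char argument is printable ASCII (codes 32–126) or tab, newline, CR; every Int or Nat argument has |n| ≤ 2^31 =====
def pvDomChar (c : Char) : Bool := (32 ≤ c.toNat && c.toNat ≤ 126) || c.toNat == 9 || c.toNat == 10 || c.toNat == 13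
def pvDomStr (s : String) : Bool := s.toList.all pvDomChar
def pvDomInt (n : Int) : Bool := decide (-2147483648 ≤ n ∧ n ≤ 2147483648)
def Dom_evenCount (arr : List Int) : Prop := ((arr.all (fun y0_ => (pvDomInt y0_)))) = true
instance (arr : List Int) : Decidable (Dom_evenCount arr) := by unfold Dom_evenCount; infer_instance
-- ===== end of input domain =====

-- B replaces the count-dictionary-then-scan with recursive elimination (test head's total
-- count, else filter out the head value and recurse); alternative decomposition, not faster.

-- ===== PORT A =====
-- second loop of A: first i with frequency[i] % 2 == 0 (every i ∈ arr is a key, so getD is its get)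
def evenCountFind (frequency : PySem.Dict Int Int) : List Int → Int
  | [] => -1
  | i :: rest =>
    if PySem.Int.mod (frequency.getD i 0) 2 == 0 then i else evenCountFind frequency rest

def evenCount (arr : List Int) : Int :=
  let frequency := arr.foldl (fun d i => d.insert i (d.getD i 0 + 1)) PySem.Dict.empty
  evenCountFind frequency arr

-- ===== PORT B =====
def evenCount_alt : List Int → Int
  | [] => -1
  | x :: rest =>
    if PySem.Int.mod (((x :: rest).count x : Int)) 2 == 0 then x
    else evenCount_alt ((x :: rest).filter (fun y => y != x))
  termination_by l => l.length
  decreasing_by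
    simp only [List.filter_cons, bne_self_eq_false, List.length_cons]
    exact Nat.lt_succ_of_le (List.length_filter_le _ _)

-- ===== PRECONDITION & SPEC =====
def Spec_evenCount (arr : List Int) (out : Int) : Prop := out = evenCount_alt arr
instance (arr : List Int) (out : Int) : Decidable (Spec_evenCount arr out) := by unfold Spec_evenCount; infer_instance

-- ===== CLAIM (what is proved, stated in full; the proofs are below) =====
def Claim_equal_evenCount : Prop := ∀ (arr : List Int), Dom_evenCount arr → Spec_evenCount arr (evenCount arr)

-- ===== LEMMAS AND PROOFS =====

-- reference scan: first element of l whose count in `full` is even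
def firstEven (full : List Int) : List Int → Int
  | [] => -1
  | i :: rest => if full.count i % 2 = 0 then i else firstEven full rest

theorem mod_two_int (n : Nat) : (PySem.Int.mod (n : Int) 2 == 0) = decide (n % 2 = 0) := by
  simp only [PySem.Int.mod]
  rw [Bool.eq_iff_iff]
  simp only [beq_iff_eq, decide_eq_true_eq, Int.fmod_eq_emod]
  omega

-- A's scan is the reference scan
theorem evenCount_eq_firstEven (arr : List Int) : evenCount arr = firstEven arr arr := by
  unfold evenCount
  have h : ∀ l : List Int, evenCountFind
      (arr.foldl (fun d i => d.insert i (d.getD i 0 + 1)) PySem.Dict.empty) l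
      = firstEven arr l := by
    intro l
    induction l with
    | nil => rfl
    | cons x rest ih =>
      simp only [evenCountFind, firstEven, ih]
      rw [PySem.Dict.getD_foldl_insert_add_one]
      have hempty : (PySem.Dict.empty : PySem.Dict Int Int).getD x 0 = 0 := rfl
      rw [hempty, zero_add, mod_two_int]
      by_cases h : arr.count x % 2 = 0 <;> simp [h]
  exact h arr

-- skipping an odd-count value: scanning l with counts from `full` equals scanning
-- l with the x-occurrences removed, against counts from `full'` agreeing off x
theorem firstEven_filter (full full' : List Int) (x : Int)
    (hodd : ¬ full.count x % 2 = 0)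
    (hagree : ∀ y : Int, y ≠ x → full'.count y = full.count y) :
    ∀ l : List Int, firstEven full l = firstEven full' (l.filter (fun y => y != x)) := by
  intro l
  induction l with
  | nil => rfl
  | cons i rest ih =>
    by_cases hix : i = x
    · subst hix
      simp only [firstEven, if_neg hodd, List.filter_cons, bne_self_eq_false]
      simpa using ih
    · have : (i != x) = true := by simpa using hix
      simp only [firstEven, List.filter_cons, this, if_true, hagree i hix, ih]

-- B computes the reference scan (induction on a length bound)
theorem alt_eq_aux : ∀ (n : Nat) (arr : List Int), arr.length ≤ n →
    evenCount_alt arr = firstEven arr arr := by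
  intro n
  induction n with
  | zero =>
    intro arr h
    match arr with
    | [] => rw [evenCount_alt]; rfl
  | succ n ih =>
    intro arr h
    match arr with
    | [] => rw [evenCount_alt]; rfl
    | x :: rest =>
      rw [evenCount_alt, mod_two_int]
      by_cases hc : (x :: rest).count x % 2 = 0
      · simp only [decide_eq_true_eq, if_pos hc]
        rw [firstEven, if_pos hc]
      · simp only [decide_eq_true_eq, if_neg hc]
        have hlen : ((x :: rest).filter (fun y => y != x)).length ≤ n := by
          simp only [List.filter_cons, bne_self_eq_false, Bool.false_eq_true,
            if_false, List.length_cons] at h ⊢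
          have := List.length_filter_le (fun y => y != x) rest
          omega
        rw [ih _ hlen]
        have hagree : ∀ y : Int, y ≠ x →
            ((x :: rest).filter (fun y => y != x)).count y = (x :: rest).count y := by
          intro y hy
          rw [List.count_filter]
          simp [hy]
        rw [← firstEven_filter (x :: rest) _ x hc hagree (x :: rest)]

theorem evenCount_alt_eq_firstEven (arr : List Int) : evenCount_alt arr = firstEven arr arr :=
  alt_eq_aux arr.length arr le_rfl

-- ===== VERDICT (by name: the statement is the Claim_ definition above) =====
theorem evenCount_spec : Claim_equal_evenCount := by
  intro arr _
  unfold Spec_evenCount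
  rw [evenCount_eq_firstEven, evenCount_alt_eq_firstEven]
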